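-- pv_equiv track=rewrite | github.com/lynochka/advent-of-code | 2020/day_18.py | find_first_paranthesis
-- ===== SOURCE A (Python) =====
-- def find_first_paranthesis(expression):
--     left = 0
--     right = 0
--     left_most_index = None
--     right_most_index = None
--     for index, char in enumerate(expression):
--         if char == "(":
--             if left == 0:
--                 left_most_index = index
--             left += 1
--             continue
--         if char == ")":
--             right_most_index = index
--             right += 1
--         if left > right:
--             continue
--         if right > left:
--             raise RuntimeError("Invalid expression")
--         if left > 0 and left == right:
--             return left_most_index, right_most_index
--     return None
-- ===== SOURCE B (Python) =====
-- def _matching_close(expression, i):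
--     """Index of the ')' that closes the currently open group, scanning from i;
--     None if the group is never closed.  Nested groups are skipped by recursion."""
--     while i < len(expression):
--         c = expression[i]
--         if c == ")":
--             return i
--         if c == "(":
--             j = _matching_close(expression, i + 1)
--             if j is None:
--                 return None
--             i = j + 1
--         else:
--             i += 1
--     return None
--
--
-- def find_first_paranthesis(expression):
--     start = expression.find("(")
--     prefix = expression if start == -1 else expression[:start]
--     if prefix.find(")") != -1:
--         raise RuntimeError("Invalid expression")
--     if start == -1:
--         return None
--     end = _matching_close(expression, start + 1)
--     if end is None:
--         return None
--     return start, end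
-- ===== Notes on version B (the rewrite author's own statement) =====
-- stated objective: faster
-- what changed: Replaces A's single character-by-character scan with two counters and a four-way branch chain by staged string operations (str.find for the first '(' and for a stray ')' in the prefix) followed by a recursive-descent matcher that finds the close of the first group by recursing on nesting structure.
import Mathlib
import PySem

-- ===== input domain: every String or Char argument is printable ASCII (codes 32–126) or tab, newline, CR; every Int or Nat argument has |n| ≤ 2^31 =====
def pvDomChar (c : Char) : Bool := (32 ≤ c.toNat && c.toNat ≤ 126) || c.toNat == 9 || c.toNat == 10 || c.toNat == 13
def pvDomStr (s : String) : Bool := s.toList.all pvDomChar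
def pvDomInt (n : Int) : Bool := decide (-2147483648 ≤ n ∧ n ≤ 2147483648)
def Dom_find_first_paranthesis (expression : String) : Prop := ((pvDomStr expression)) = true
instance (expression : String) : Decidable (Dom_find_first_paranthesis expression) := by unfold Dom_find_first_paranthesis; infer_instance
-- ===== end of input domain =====

-- B replaces A's counter scan by staged str.find passes plus a recursive-descent matcher
-- (objective: faster, measured).  A raises RuntimeError exactly when a ')' precedes the first
-- '(' (excluded by Pre_); both ports return none there.

-- ===== PORT A =====
def findA : List Char → Int → Int → Int → Option Int → Option Int → Option (Int × Int)
  | [], _, _, _, _, _ => none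
  | c :: rest, idx, left, right, lmi, rmi =>
    if c = '(' then
      findA rest (idx + 1) (left + 1) right (if left = 0 then some idx else lmi) rmi
    else
      let right' := if c = ')' then right + 1 else right
      let rmi' := if c = ')' then some idx else rmi
      if left > right' then
        findA rest (idx + 1) left right' lmi rmi'
      else if right' > left then
        none  -- raise RuntimeError: excluded by Pre_
      else if left > 0 ∧ left = right' then
        match lmi, rmi' with
        | some a, some b => some (a, b)
        | _, _ => none
      else
        findA rest (idx + 1) left right' lmi rmi'

def find_first_paranthesis (expression : String) : Option (Int × Int) :=
  findA expression.toList 0 0 0 none none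

-- ===== PORT B =====
-- _matching_close: the unscanned suffix of the string is carried alongside the current
-- index i (Python walks the same suffix via s[i]); the result also returns the suffix
-- after the found ')' — the Lean form of Python's 'i = j + 1' continuation — bundled
-- with a length bound for termination.
def findMatch : (l : List Char) → (i : Int) → Option (Int × {r : List Char // r.length < l.length})
  | [], _ => none
  | c :: rest, i =>
    if c = ')' then some (i, ⟨rest, by simp⟩)
    else if c = '(' then
      match findMatch rest (i + 1) with
      | none => none
      | some (j, ⟨r, hr⟩) =>
        match findMatch r (j + 1) with
        | none => none
        | some (k, ⟨r2, h2⟩) => some (k, ⟨r2, by simp; omega⟩)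
    else
      match findMatch rest (i + 1) with
      | none => none
      | some (j, ⟨r, hr⟩) => some (j, ⟨r, by simp; omega⟩)
termination_by l _ => l.length
decreasing_by all_goals (simp_all; try omega)

def find_first_paranthesis_alt (expression : String) : Option (Int × Int) :=
  let s := expression.toList
  let start := PySem.Chars.find s ['(']                       -- expression.find("(")
  let pre := if start = -1 then s else PySem.List.slice s none (some start)  -- expression[:start]
  if PySem.Chars.find pre [')'] ≠ -1 then
    none  -- raise RuntimeError: excluded by Pre_
  else if start = -1 then
    none
  else
    match findMatch (s.drop (start.toNat + 1)) (start + 1) with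
    | none => none
    | some (j, _) => some (start, j)

-- ===== PRECONDITION & SPEC =====
-- Pre_: A raises RuntimeError exactly when some ')' occurs with no '(' before it;
-- Pre_ admits precisely the inputs on which A returns normally.
def Pre_find_first_paranthesis (expression : String) : Prop :=
  ∀ n, n < expression.toList.length → expression.toList[n]? = some ')' →
    ∃ m, m < n ∧ expression.toList[m]? = some '('
instance (expression : String) : Decidable (Pre_find_first_paranthesis expression) := by
  unfold Pre_find_first_paranthesis; infer_instance

def pvWitness_find_first_paranthesis : String := "(2 * (3 + 4))"

def Spec_find_first_paranthesis (expression : String) (out : Option (Int × Int)) : Prop := out = find_first_paranthesis_alt expression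
instance (expression : String) (out : Option (Int × Int)) : Decidable (Spec_find_first_paranthesis expression out) := by unfold Spec_find_first_paranthesis; infer_instance

-- ===== CLAIM (what is proved, stated in full; the proofs are below) =====
def Claim_equal_find_first_paranthesis : Prop := ∀ (expression : String), Dom_find_first_paranthesis expression → Pre_find_first_paranthesis expression → Spec_find_first_paranthesis expression (find_first_paranthesis expression)

-- ===== LEMMAS AND PROOFS =====

-- chain l i d: follow d successive findMatch calls (closing d currently-open groups),
-- returning the index of the last close; the proof-side bridge between A's depth
-- counter and B's recursive matcher.
def chain : (l : List Char) → Int → Nat → Option Int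
  | _, _, 0 => none
  | l, i, (d + 1) =>
    match findMatch l i with
    | none => none
    | some (j, ⟨r, _⟩) => if d = 0 then some j else chain r (j + 1) d
termination_by l _ _ => l.length
decreasing_by simp_all

theorem chain_nil (i : Int) (d : Nat) : chain [] i d = none := by
  cases d <;> simp [chain, findMatch]

theorem chain_open (rest : List Char) (i : Int) (d : Nat) (hd : 1 ≤ d) :
    chain ('(' :: rest) i d = chain rest (i + 1) (d + 1) := by
  obtain ⟨e, rfl⟩ : ∃ e, d = e + 1 := ⟨d - 1, by omega⟩
  cases hf : findMatch rest (i + 1) with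
  | none => simp [chain, findMatch, hf]
  | some p =>
    obtain ⟨j, r, hr⟩ := p
    cases hg : findMatch r (j + 1) with
    | none =>
      cases e <;> simp [chain, findMatch, hf, hg]
    | some q =>
      obtain ⟨k, r2, h2⟩ := q
      cases e <;> simp [chain, findMatch, hf, hg]

theorem chain_other (c : Char) (rest : List Char) (i : Int) (d : Nat)
    (hc1 : c ≠ '(') (hc2 : c ≠ ')') (hd : 1 ≤ d) :
    chain (c :: rest) i d = chain rest (i + 1) d := by
  obtain ⟨e, rfl⟩ : ∃ e, d = e + 1 := ⟨d - 1, by omega⟩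
  cases hf : findMatch rest (i + 1) with
  | none => simp [chain, findMatch, hf, hc1, hc2]
  | some p =>
    obtain ⟨j, r, hr⟩ := p
    simp [chain, findMatch, hf, hc1, hc2]

theorem chain_close (rest : List Char) (i : Int) (d : Nat) :
    chain (')' :: rest) i (d + 1) = if d = 0 then some i else chain rest (i + 1) d := by
  simp [chain, findMatch]

-- Step lemmas: one findA transition per character class.
theorem findA_step_open_first (rest : List Char) (idx right : Int) (rmi : Option Int) :
    findA ('(' :: rest) idx 0 right none rmi
      = findA rest (idx + 1) 1 right (some idx) rmi := by
  simp [findA]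

theorem findA_step_open (rest : List Char) (idx left right : Int) (lmi rmi : Option Int)
    (h : ¬ left = 0) :
    findA ('(' :: rest) idx left right lmi rmi
      = findA rest (idx + 1) (left + 1) right lmi rmi := by
  simp [findA, h]

theorem findA_step_close_deep (rest : List Char) (idx left right : Int) (lmi rmi : Option Int)
    (h : left > right + 1) :
    findA (')' :: rest) idx left right lmi rmi
      = findA rest (idx + 1) left (right + 1) lmi (some idx) := by
  simp [findA, h]

theorem findA_step_close_done (rest : List Char) (idx right a : Int) (rmi : Option Int)
    (h : 0 ≤ right) :
    findA (')' :: rest) idx (right + 1) right (some a) rmi = some (a, idx) := by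
  have h3 : right + 1 > 0 ∧ (right + 1 : Int) = right + 1 := ⟨by omega, rfl⟩
  simp [findA, h3]

theorem findA_step_other (c : Char) (rest : List Char) (idx left right : Int)
    (lmi rmi : Option Int) (hc1 : c ≠ '(') (hc2 : c ≠ ')') (h : left > right) :
    findA (c :: rest) idx left right lmi rmi
      = findA rest (idx + 1) left right lmi rmi := by
  simp [findA, hc1, hc2, h]

theorem findA_step_other_zero (c : Char) (rest : List Char) (idx : Int)
    (hc1 : c ≠ '(') (hc2 : c ≠ ')') :
    findA (c :: rest) idx 0 0 none none = findA rest (idx + 1) 0 0 none none := by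
  simp [findA, hc1, hc2]

-- Main simulation: inside d open groups (left − right = d ≥ 1, saved index a) A's
-- counter scan returns (a, j) where j closes the outermost group, i.e. the d-th
-- successive findMatch.
theorem findA_eq_chain : ∀ (n : Nat) (l : List Char), l.length ≤ n →
    ∀ (idx right a : Int) (rmi : Option Int) (d : Nat), 0 ≤ right → 1 ≤ d →
    findA l idx (right + d) right (some a) rmi = (chain l idx d).map (fun j => (a, j)) := by
  intro n
  induction n with
  | zero =>
    intro l hl idx right a rmi d _ _
    have : l = [] := List.eq_nil_of_length_eq_zero (by omega)
    subst this
    simp [findA, chain_nil]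
  | succ n ih =>
    intro l hl idx right a rmi d hr hd
    cases l with
    | nil => simp [findA, chain_nil]
    | cons c rest =>
      have hrest : rest.length ≤ n := by simp at hl; omega
      by_cases hc : c = '('
      · subst hc
        rw [chain_open rest idx d hd]
        rw [findA_step_open rest idx _ right (some a) rmi (by omega)]
        rw [show right + (d : Int) + 1 = right + ((d : Nat) + 1 : Nat) by push_cast; ring]
        exact ih rest hrest (idx + 1) right a rmi (d + 1) hr (by omega)
      · by_cases hc2 : c = ')'
        · subst hc2
          obtain ⟨e, rfl⟩ : ∃ e, d = e + 1 := ⟨d - 1, by omega⟩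
          rw [chain_close]
          by_cases he : e = 0
          · subst he
            rw [if_pos rfl]
            rw [show right + ((0 + 1 : Nat) : Int) = right + 1 by norm_num]
            rw [findA_step_close_done rest idx right a rmi hr]
            rfl
          · rw [if_neg he]
            rw [findA_step_close_deep rest idx _ right (some a) rmi (by
              have h1 : 1 ≤ e := by omega
              push_cast; omega)]
            rw [show right + ((e + 1 : Nat) : Int) = (right + 1) + (e : Nat) by push_cast; ring]
            exact ih rest hrest (idx + 1) (right + 1) a (some idx) e (by omega) (by omega)
        · rw [chain_other c rest idx d hc hc2 hd]
          rw [findA_step_other c rest idx _ right (some a) rmi hc hc2 (by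
            have h1 : 1 ≤ d := hd
            push_cast; omega)]
          exact ih rest hrest (idx + 1) right a rmi d hr hd

-- d = 1: the chain is a single findMatch.
theorem chain_one (l : List Char) (i : Int) :
    chain l i 1 = (findMatch l i).map (fun p => p.1) := by
  cases hf : findMatch l i with
  | none => simp [chain, hf]
  | some p => obtain ⟨j, r, hr⟩ := p; simp [chain, hf]

-- Prefix walk: over characters that are neither '(' nor ')', A keeps state (0,0,none,none).
theorem findA_prefix : ∀ (pre l : List Char) (idx : Int),
    (∀ c ∈ pre, c ≠ '(' ∧ c ≠ ')') →
    findA (pre ++ l) idx 0 0 none none = findA l (idx + pre.length) 0 0 none none := by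
  intro pre
  induction pre with
  | nil => intro l idx _; simp
  | cons c t ih =>
    intro l idx hn
    have hc := hn c (by simp)
    have ht : ∀ x ∈ t, x ≠ '(' ∧ x ≠ ')' := fun x hx => hn x (by simp [hx])
    rw [List.cons_append, findA_step_other_zero c (t ++ l) idx hc.1 hc.2, ih l (idx + 1) ht]
    congr 1
    simp only [List.length_cons]
    push_cast
    ring

-- [c] is a prefix of l.drop i iff l[i]? = some c.
theorem singleton_prefix_drop {l : List Char} {i : Nat} {c : Char} :
    [c] <+: l.drop i ↔ l[i]? = some c := by
  constructor
  · rintro ⟨t, ht⟩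
    have h : (l.drop i).head? = some c := by rw [← ht]; rfl
    rwa [List.head?_drop] at h
  · intro h
    have h2 : (l.drop i).head? = some c := by rwa [List.head?_drop]
    cases hd : l.drop i with
    | nil => rw [hd] at h2; simp at h2
    | cons x t =>
      rw [hd] at h2
      simp at h2
      subst h2
      exact ⟨t, by simp⟩

theorem singleton_infix_mem {l : List Char} {c : Char} :
    [c] <:+: l ↔ c ∈ l := by
  constructor
  · rintro ⟨s, t, h⟩
    rw [← h]; simp
  · intro h
    obtain ⟨s, t, rfl⟩ := List.append_of_mem h
    exact ⟨s, t, by simp⟩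

-- ===== VERDICT (by name: the statement is the Claim_ definition above) =====
theorem find_first_paranthesis_spec : Claim_equal_find_first_paranthesis := by
  intro expression _ hpre
  unfold Spec_find_first_paranthesis find_first_paranthesis find_first_paranthesis_alt
  unfold Pre_find_first_paranthesis at hpre
  set s := expression.toList with hs
  by_cases hopen : '(' ∈ s
  · -- there is a first '(' ; K is its index
    have hinfix : ['('] <:+: s := singleton_infix_mem.mpr hopen
    have hfind : PySem.Chars.find s ['('] ≠ -1 := (PySem.Chars.find_ne_neg_one_iff _ _).mpr hinfix
    have hposf : 0 ≤ PySem.Chars.find s ['('] := (PySem.Chars.find_nonneg_iff _ _).mpr hinfix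
    obtain ⟨hpref, hmin⟩ := PySem.Chars.find_spec (s := s) (sub := ['(']) hposf
    dsimp only
    rw [if_neg hfind, PySem.List.slice_to s hposf]
    have hcast : PySem.Chars.find s ['('] = (((PySem.Chars.find s ['(']).toNat : Nat) : Int) := by
      omega
    have hget : s[(PySem.Chars.find s ['(']).toNat]? = some '(' := singleton_prefix_drop.mp hpref
    obtain ⟨hlt, hgetE⟩ := List.getElem?_eq_some_iff.mp hget
    have hnotbefore : ∀ i, i < (PySem.Chars.find s ['(']).toNat → s[i]? ≠ some '(' := by
      intro i hi hcontra
      exact hmin i hi (singleton_prefix_drop.mpr hcontra)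
    -- the prefix before (PySem.Chars.find s ['(']).toNat has no '(' and (by Pre_) no ')'
    have hprefix_clean : ∀ c ∈ s.take (PySem.Chars.find s ['(']).toNat, c ≠ '(' ∧ c ≠ ')' := by
      intro c hc
      obtain ⟨i, hi, hig⟩ := List.mem_take_iff_getElem.mp hc
      have hilt : i < (PySem.Chars.find s ['(']).toNat := by omega
      have higq : s[i]? = some c := List.getElem?_eq_some_iff.mpr ⟨by omega, hig⟩
      constructor
      · intro h; subst h; exact hnotbefore i hilt higq
      · intro h; subst h
        obtain ⟨m, hm, hmg⟩ := hpre i (by omega) higq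
        exact hnotbefore m (by omega) hmg
    -- decompose s around the first '('
    have hdecomp : s = s.take (PySem.Chars.find s ['(']).toNat ++ '(' :: s.drop ((PySem.Chars.find s ['(']).toNat + 1) := by
      conv_lhs => rw [← List.take_append_drop (PySem.Chars.find s ['(']).toNat s]
      congr 1
      rw [List.drop_eq_getElem_cons hlt, hgetE]
    have hlen_take : (((s.take (PySem.Chars.find s ['(']).toNat).length : Nat) : Int) = ((PySem.Chars.find s ['(']).toNat : Int) := by
      have h : (s.take (PySem.Chars.find s ['(']).toNat).length = (PySem.Chars.find s ['(']).toNat := by rw [List.length_take]; omega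
      rw [h]
    -- A's scan = prefix walk, then the opening step, then the depth-1 simulation
    have hA : findA s 0 0 0 none none =
        (chain (s.drop ((PySem.Chars.find s ['(']).toNat + 1)) (((PySem.Chars.find s ['(']).toNat : Int) + 1) 1).map (fun j => (((PySem.Chars.find s ['(']).toNat : Int), j)) := by
      conv_lhs => rw [hdecomp]
      rw [findA_prefix _ _ 0 hprefix_clean, hlen_take, zero_add]
      rw [findA_step_open_first]
      have key := findA_eq_chain (s.drop ((PySem.Chars.find s ['(']).toNat + 1)).length (s.drop ((PySem.Chars.find s ['(']).toNat + 1)) le_rfl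
        (((PySem.Chars.find s ['(']).toNat : Int) + 1) 0 ((PySem.Chars.find s ['(']).toNat : Int) none 1 le_rfl le_rfl
      rw [show ((0 : Int) + ((1 : Nat) : Int)) = 1 by norm_num] at key
      exact key
    have hnoclose : PySem.Chars.find (s.take (PySem.Chars.find s ['(']).toNat) [')'] = -1 := by
      rw [PySem.Chars.find_eq_neg_one_iff, singleton_infix_mem]
      intro hmem
      exact (hprefix_clean ')' hmem).2 rfl
    rw [← hcast] at hA
    rw [hnoclose, if_neg (by simp), if_neg hfind, hA, chain_one]
    cases hfm : findMatch (s.drop ((PySem.Chars.find s ['(']).toNat + 1))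
        (PySem.Chars.find s ['('] + 1) with
    | none => simp
    | some p => obtain ⟨j, r, hr⟩ := p; simp
  · -- no '(' at all: Pre_ forbids any ')', so every char is neutral and A returns none
    have hnoclose : ')' ∉ s := by
      intro hmem
      obtain ⟨n, hn, hng⟩ := List.mem_iff_getElem.mp hmem
      obtain ⟨m, hm, hmg⟩ := hpre n hn (List.getElem?_eq_some_iff.mpr ⟨hn, hng⟩)
      obtain ⟨hml, hmE⟩ := List.getElem?_eq_some_iff.mp hmg
      exact hopen (hmE ▸ List.getElem_mem hml)
    have hclean : ∀ c ∈ s, c ≠ '(' ∧ c ≠ ')' :=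
      fun c hc => ⟨fun h => hopen (h ▸ hc), fun h => hnoclose (h ▸ hc)⟩
    have hA : findA s 0 0 0 none none = none := by
      have h := findA_prefix s [] 0 hclean
      simpa [findA] using h
    have hf1 : PySem.Chars.find s ['('] = -1 :=
      (PySem.Chars.find_eq_neg_one_iff _ _).mpr (fun h => hopen (singleton_infix_mem.mp h))
    have hf2 : PySem.Chars.find s [')'] = -1 :=
      (PySem.Chars.find_eq_neg_one_iff _ _).mpr (fun h => hnoclose (singleton_infix_mem.mp h))
    rw [hA]
    dsimp only
    rw [hf1, if_pos rfl, hf2]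
    simp
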